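-- pv_equiv track=rewrite | github.com/blzzua/codewars | 7-kyu/upper_body_strength.py | alex_mistakes
-- ===== SOURCE A (Python) =====
-- def alex_mistakes(number_of_katas, time_limit):
--     time_limit -= 60 * number_of_katas // 10
--     i = 0
--     while True:
--         time_limit = time_limit - 5 * 2**i
--         if time_limit < 0:
--             break
--         else:
--             i = i + 1
--     return i
-- ===== SOURCE B (Python) =====
-- def alex_mistakes(number_of_katas, time_limit):
--     # closed form: answer is the smallest i >= 0 with 5*(2**(i+1)-1) > remaining time
--     r = time_limit - 6 * number_of_katas
--     m = r // 5
--     if m <= 0: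
--         return 0
--     return (m + 1).bit_length() - 1
-- ===== Notes on version B (the rewrite author's own statement) =====
-- stated objective: alternative
-- what changed: Replaced the doubling subtraction loop with a closed form: with m = (time_limit - 6*number_of_katas)//5, the answer is 0 if m <= 0 else (m+1).bit_length() - 1.
import Mathlib
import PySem

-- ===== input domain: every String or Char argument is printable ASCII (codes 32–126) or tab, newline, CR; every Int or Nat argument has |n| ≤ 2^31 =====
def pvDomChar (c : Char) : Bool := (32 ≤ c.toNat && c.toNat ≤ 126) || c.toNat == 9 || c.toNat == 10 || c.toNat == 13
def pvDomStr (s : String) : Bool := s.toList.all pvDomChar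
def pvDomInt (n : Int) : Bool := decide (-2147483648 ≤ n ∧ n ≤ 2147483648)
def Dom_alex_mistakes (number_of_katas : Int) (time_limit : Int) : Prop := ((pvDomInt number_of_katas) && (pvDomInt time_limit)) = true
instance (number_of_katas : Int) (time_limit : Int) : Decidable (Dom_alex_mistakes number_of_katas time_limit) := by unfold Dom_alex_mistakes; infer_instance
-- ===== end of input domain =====

-- B replaces A's doubling subtraction loop by a closed form via bit_length (objective: alternative; speed gain not measurable at these sizes).
-- ===== PORT A =====
-- the 'while True' loop: state is the running time_limit t and the counter i
def alexLoop (t : Int) (i : Nat) : Int :=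
  if t - 5 * 2 ^ i < 0 then (i : Int) else alexLoop (t - 5 * 2 ^ i) (i + 1)
termination_by t.toNat
decreasing_by
  have hp : (0:Int) < 2 ^ i := pow_pos (by norm_num) i
  simp only [not_lt] at *
  omega

def alex_mistakes (number_of_katas : Int) (time_limit : Int) : Int :=
  alexLoop (time_limit - PySem.Int.floordiv (60 * number_of_katas) 10) 0

-- ===== PORT B =====
def alex_mistakes_alt (number_of_katas : Int) (time_limit : Int) : Int :=
  if PySem.Int.floordiv (time_limit - 6 * number_of_katas) 5 ≤ 0 then 0
  else (PySem.Int.bitLength (PySem.Int.floordiv (time_limit - 6 * number_of_katas) 5 + 1) : Int) - 1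

-- ===== PRECONDITION & SPEC =====
def Spec_alex_mistakes (number_of_katas : Int) (time_limit : Int) (out : Int) : Prop := out = alex_mistakes_alt number_of_katas time_limit
instance (number_of_katas : Int) (time_limit : Int) (out : Int) : Decidable (Spec_alex_mistakes number_of_katas time_limit out) := by unfold Spec_alex_mistakes; infer_instance

-- ===== CLAIM (what is proved, stated in full; the proofs are below) =====
def Claim_equal_alex_mistakes : Prop := ∀ (number_of_katas : Int) (time_limit : Int), Dom_alex_mistakes number_of_katas time_limit → Spec_alex_mistakes number_of_katas time_limit (alex_mistakes number_of_katas time_limit)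

-- ===== LEMMAS AND PROOFS =====

-- ===== VERDICT (by name: the statement is the Claim_ definition above) =====
-- characterisation of the loop: if t lies in the n-th geometric window scaled by 2^i, it returns i + n
theorem alexLoop_window (n : Nat) : ∀ (i : Nat) (t : Int),
    5 * 2 ^ i * (2 ^ n - 1) ≤ t → t < 5 * 2 ^ i * (2 ^ (n + 1) - 1) →
    alexLoop t i = (i : Int) + n := by
  induction n with
  | zero =>
    intro i t _ hub
    norm_num at hub
    rw [alexLoop, if_pos (show t - 5 * 2 ^ i < 0 by omega)]
    norm_num
  | succ n ih =>
    intro i t hlb hub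
    have hp : (0:Int) < 2 ^ i := pow_pos (by norm_num) i
    have hpn : (2:Int) ≤ 2 ^ (n + 1) := by
      calc (2:Int) = 2 ^ 1 := by norm_num
        _ ≤ 2 ^ (n + 1) := pow_le_pow_right₀ (by norm_num) (by omega)
    have hkey : 5 * 2 ^ i * 1 ≤ 5 * 2 ^ i * ((2:Int) ^ (n + 1) - 1) :=
      mul_le_mul_of_nonneg_left (by omega) (by positivity)
    have hstep : ¬ (t - 5 * 2 ^ i < 0) := by simp only [not_lt]; nlinarith
    rw [alexLoop]
    simp only [hstep, if_false]
    have h1 : 5 * 2 ^ (i + 1) * ((2:Int) ^ n - 1) ≤ t - 5 * 2 ^ i := by ring_nf; ring_nf at hlb; linarith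
    have h2 : t - 5 * 2 ^ i < 5 * 2 ^ (i + 1) * ((2:Int) ^ (n + 1) - 1) := by ring_nf; ring_nf at hub; linarith
    rw [ih (i + 1) _ h1 h2]
    push_cast
    ring

theorem alexLoop_small (t : Int) (h : t < 5) : alexLoop t 0 = 0 := by
  rw [alexLoop, if_pos (show t - 5 * 2 ^ 0 < 0 by norm_num; omega)]
  norm_num

theorem alex_mistakes_spec : Claim_equal_alex_mistakes := by
  intro k t _
  unfold Spec_alex_mistakes alex_mistakes alex_mistakes_alt
  have h60 : PySem.Int.floordiv (60 * k) 10 = 6 * k := by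
    rw [PySem.Int.floordiv_eq_ediv_of_pos (by norm_num)]
    omega
  rw [h60]
  set r : Int := t - 6 * k with hr
  have h5 : PySem.Int.floordiv r 5 = r / 5 :=
    PySem.Int.floordiv_eq_ediv_of_pos (by norm_num)
  rw [h5]
  by_cases hm : r / 5 ≤ 0
  · simp only [hm, if_true]
    exact alexLoop_small r (by omega)
  · simp only [hm, if_false]
    simp only [not_le] at hm
    set m : Int := r / 5 with hmdef
    have hm1 : 1 ≤ m := hm
    have hmr : 5 * m ≤ r ∧ r < 5 * m + 5 := by omega
    set B : Nat := PySem.Int.bitLength (m + 1) with hB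
    have hB1 : 1 ≤ B := by
      have := PySem.Int.two_pow_bitLength_le (m + 1) (by omega)
      by_contra hc
      have hB0 : B = 0 := by omega
      have hlt := PySem.Int.lt_two_pow_bitLength (m + 1)
      rw [← hB] at hlt
      rw [hB0] at hlt
      simp at hlt
      omega
    obtain ⟨n, hn⟩ : ∃ n : Nat, B = n + 1 := ⟨B - 1, by omega⟩
    have hub : (m + 1).natAbs < 2 ^ (n + 1) := by
      have := PySem.Int.lt_two_pow_bitLength (m + 1); rw [← hB, hn] at this; exact this
    have hlbn : 2 ^ n ≤ (m + 1).natAbs := by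
      have := PySem.Int.two_pow_bitLength_le (m + 1) (by omega)
      rw [← hB, hn] at this; simpa using this
    have hna : ((m + 1).natAbs : Int) = m + 1 := Int.natAbs_of_nonneg (by omega)
    have hubi : m + 1 < (2:Int) ^ (n + 1) := by rw [← hna]; exact_mod_cast hub
    have hlbi : (2:Int) ^ n ≤ m + 1 := by rw [← hna]; exact_mod_cast hlbn
    have hwin := alexLoop_window n 0 r
      (by simp only [pow_zero]; linarith [hmr.1])
      (by simp only [pow_zero]; linarith [hmr.2])
    rw [hwin, hn]
    push_cast
    ring
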